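-- pv_equiv track=rewrite | github.com/mayanyan1991/Chinese_vocabulary_filter | main.py | search_vol
-- ===== SOURCE A (Python) =====
-- def search_vol(list_char, list_dic):
--     #search for all the vocabularies in list_dic contains
--     # only characters in the list_char
--     list_learned_vol = []
--     for char in list_char:
--         for vol in list_dic:
--             if char in vol:
--                 if all(item in list_char for item in vol):
--                     list_learned_vol.append(vol)
--     list_learned_vol = list(dict.fromkeys(list_learned_vol))
--     return list_learned_vol
-- ===== SOURCE B (Python) =====
-- def search_vol(list_char, list_dic):
--     # single pass over the dictionary; qualifying words sorted by
--     # (first matching character's index, dictionary index)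
--     charset = set(list_char)
--     seen = set()
--     hits = []
--     for j, vol in enumerate(list_dic):
--         if vol in seen:
--             continue
--         if not all(c in charset for c in vol):
--             continue
--         found = next((p for p in enumerate(list_char) if p[1] in vol), None)
--         if found is None:
--             continue
--         seen.add(vol)
--         hits.append((found[0], j, vol))
--     hits.sort(key=lambda t: (t[0], t[1]))
--     return [t[2] for t in hits]
-- ===== Notes on version B (the rewrite author's own statement) =====
-- stated objective: faster
-- what changed: Replaces the char-major nested scan with trailing dict-dedup by a single deduplicating pass over the dictionary (set lookups, first-matching-char index per word) followed by a sort on (char index, dictionary index).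
import Mathlib
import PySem

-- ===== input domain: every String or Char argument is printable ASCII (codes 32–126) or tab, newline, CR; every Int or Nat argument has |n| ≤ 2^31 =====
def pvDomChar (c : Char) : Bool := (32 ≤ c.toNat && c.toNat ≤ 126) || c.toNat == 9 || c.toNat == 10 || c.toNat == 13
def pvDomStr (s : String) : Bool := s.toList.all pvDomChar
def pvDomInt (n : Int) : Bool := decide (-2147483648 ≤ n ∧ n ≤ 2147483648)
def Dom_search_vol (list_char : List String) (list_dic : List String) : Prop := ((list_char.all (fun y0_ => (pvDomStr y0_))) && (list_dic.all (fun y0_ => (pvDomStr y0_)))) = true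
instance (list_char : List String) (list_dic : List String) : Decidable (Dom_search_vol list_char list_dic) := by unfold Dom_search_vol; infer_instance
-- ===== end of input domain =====

-- B replaces A's char-major nested scans + trailing dedup by one deduplicating pass over
-- the dictionary followed by a sort on (first matching char index, dictionary index); measurably faster.
-- ===== PORT A =====
def search_vol (list_char : List String) (list_dic : List String) : List String :=
  let list_learned_vol : List String :=
    list_char.foldl (fun acc char =>
      list_dic.foldl (fun acc vol =>
        if PySem.Str.isIn char vol then
          if vol.toList.all (fun item => list_char.contains (String.ofList [item])) then
            acc ++ [vol]
          else acc
        else acc) acc) []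
  PySem.List.dedup list_learned_vol

-- ===== PORT B =====
def search_vol_alt (list_char : List String) (list_dic : List String) : List String :=
  let charset : PySem.Set String := PySem.Set.ofList list_char
  let r := (PySem.List.enumerate list_dic).foldl
    (fun (st : PySem.Set String × List (Int × Int × String)) jv =>
      let j := jv.1
      let vol := jv.2
      if st.1.contains vol then st
      else if !(vol.toList.all (fun c => charset.contains (String.ofList [c]))) then st
      else
        match (PySem.List.enumerate list_char).find? (fun p => PySem.Str.isIn p.2 vol) with
        | none => st
        | some found => (st.1.add vol, st.2 ++ [(found.1, j, vol)]))
    (PySem.Set.empty, [])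
  (PySem.List.sorted2 r.2 (fun t => t.1) (fun t => t.2.1)).map (fun t => t.2.2)

-- ===== PRECONDITION & SPEC =====
def Spec_search_vol (list_char : List String) (list_dic : List String) (out : List String) : Prop := out = search_vol_alt list_char list_dic
instance (list_char : List String) (list_dic : List String) (out : List String) : Decidable (Spec_search_vol list_char list_dic out) := by unfold Spec_search_vol; infer_instance

-- ===== CLAIM (what is proved, stated in full; the proofs are below) =====
def Claim_equal_search_vol : Prop := ∀ (list_char : List String) (list_dic : List String), Dom_search_vol list_char list_dic → Spec_search_vol list_char list_dic (search_vol list_char list_dic)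

-- ===== LEMMAS AND PROOFS =====

-- proof-layer abbreviations
def pvOk (list_char : List String) (v : String) : Bool :=
  v.toList.all (fun c => list_char.contains (String.ofList [c]))

def pvQual (list_char : List String) (v : String) : Bool :=
  pvOk list_char v && list_char.any (fun c => PySem.Str.isIn c v)

def pvL (list_char list_dic : List String) : List String :=
  list_char.flatMap (fun c => list_dic.filter (fun v => PySem.Str.isIn c v && pvOk list_char v))

def pvK1 (list_char : List String) (v : String) : Int :=
  (list_char.findIdx (fun c => PySem.Str.isIn c v) : Int)

def pvK2 (list_dic : List String) (v : String) : Int := (list_dic.idxOf v : Int)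

def pvTag (list_char list_dic : List String) (v : String) : Int × Int × String :=
  (pvK1 list_char v, pvK2 list_dic v, v)

def pvKey (t : Int × Int × String) : Lex (Int × Int) := toLex (t.1, t.2.1)

-- ---- Step A1: A's nested loops build pvL, then dedup
theorem stepA (list_char list_dic : List String) :
    search_vol list_char list_dic = PySem.List.dedup (pvL list_char list_dic) := by
  unfold search_vol pvL
  have hin : (fun (acc : List String) (char : String) =>
      list_dic.foldl (fun acc vol =>
        if PySem.Str.isIn char vol then
          if vol.toList.all (fun item => list_char.contains (String.ofList [item])) then
            acc ++ [vol]
          else acc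
        else acc) acc)
      = fun acc char => acc ++ list_dic.filter (fun v => PySem.Str.isIn char v && pvOk list_char v) := by
    funext acc char
    have := PySem.List.foldl_append_if
      (fun v => PySem.Str.isIn char v && pvOk list_char v) (fun v => v) list_dic acc
    simp only [List.map_id'] at this
    rw [← this]
    apply PySem.List.foldl_congr_mem
    intro acc' x _
    rw [show (x.toList.all fun item => list_char.contains (String.ofList [item]))
        = pvOk list_char x from rfl]
    cases h1 : PySem.Str.isIn char x <;> cases h2 : pvOk list_char x <;> simp_all
  rw [hin, PySem.List.foldl_append_eq_flatMap]
  rfl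

theorem enum_cons {α : Type} (x : α) (xs : List α) (s : Int) :
    PySem.List.enumerate (x :: xs) s = (s, x) :: PySem.List.enumerate xs (s + 1) := rfl
  -- ---- find? over enumerate vs findIdx
theorem enum_find_eq_none {α : Type} (g : α → Bool) (xs : List α) (s : Int)
    (h : ∀ a ∈ xs, g a = false) :
    (PySem.List.enumerate xs s).find? (fun p => g p.2) = none := by
  induction xs generalizing s with
  | nil => rfl
  | cons x t ih =>
    rw [enum_cons]
    simp only [List.find?_cons]
    rw [h x (by simp)]
    exact ih (s + 1) (fun a ha => h a (by simp [ha]))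

theorem enum_find_fst {α : Type} (g : α → Bool) (xs : List α) (s : Int) (pr : Int × α)
    (h : (PySem.List.enumerate xs s).find? (fun p => g p.2) = some pr) :
    pr.1 = s + (xs.findIdx g : Int) := by
  induction xs generalizing s with
  | nil => simp [PySem.List.enumerate_nil] at h
  | cons x t ih =>
    rw [enum_cons] at h
    simp only [List.find?_cons] at h
    cases hg : g x with
    | true => rw [hg] at h; simp at h; rw [← h]; simp [List.findIdx_cons, hg]
    | false =>
      rw [hg] at h; simp at h
      have := ih (s + 1) h
      rw [this]
      simp [List.findIdx_cons, hg]
      omega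

theorem enum_find_isSome {α : Type} (g : α → Bool) (xs : List α) (s : Int)
    (h : ∃ a ∈ xs, g a = true) :
    ((PySem.List.enumerate xs s).find? (fun p => g p.2)).isSome = true := by
  induction xs generalizing s with
  | nil => simp at h
  | cons x t ih =>
    rw [enum_cons]
    simp only [List.find?_cons]
    cases hg : g x with
    | true => simp
    | false =>
      rcases h with ⟨a, ha, hga⟩
      rcases List.mem_cons.mp ha with rfl | hat
      · rw [hga] at hg; cases hg
      · exact ih (s + 1) ⟨a, hat, hga⟩


-- the body of B's fold, named for the invariant proof
def pvF (list_char : List String) (st : PySem.Set String × List (Int × Int × String))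
    (jv : Int × String) : PySem.Set String × List (Int × Int × String) :=
  let j := jv.1
  let vol := jv.2
  if st.1.contains vol then st
  else if !(vol.toList.all (fun c => (PySem.Set.ofList list_char).contains (String.ofList [c]))) then st
  else
    match (PySem.List.enumerate list_char).find? (fun p => PySem.Str.isIn p.2 vol) with
    | none => st
    | some found => (st.1.add vol, st.2 ++ [(found.1, j, vol)])

theorem contains_ofList {α : Type} [BEq α] [LawfulBEq α] (xs : List α) (a : α) :
    (PySem.Set.ofList xs).contains a = xs.contains a := by
  show List.contains (PySem.Set.ofList xs) a = List.contains xs a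
  by_cases h : a ∈ xs
  · rw [List.contains_iff_mem.mpr ((PySem.Set.mem_ofList xs a).mpr h),
      List.contains_iff_mem.mpr h]
  · have h1 : List.contains (PySem.Set.ofList xs) a = false := by
      rw [← Bool.not_eq_true]
      intro hc
      exact h ((PySem.Set.mem_ofList xs a).mp (List.contains_iff_mem.mp hc))
    have h2 : List.contains xs a = false := by
      rw [← Bool.not_eq_true]
      intro hc
      exact h (List.contains_iff_mem.mp hc)
    rw [h1, h2]

theorem stepB_inv (list_char list_dic : List String) (pre : List String) :
    ∀ suf : List String, list_dic = pre ++ suf →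
    (PySem.List.enumerate pre 0).foldl (pvF list_char) (PySem.Set.empty, []) =
      (PySem.Set.ofList (pre.filter (pvQual list_char)),
       (PySem.Set.ofList (pre.filter (pvQual list_char))).map (pvTag list_char list_dic)) := by
  induction pre using List.reverseRecOn with
  | nil =>
    intro suf h
    simp [PySem.List.enumerate_nil, PySem.Set.empty_eq, PySem.Set.ofList_nil]
  | append_singleton pre x ih =>
    intro suf hdic
    have hdic' : list_dic = pre ++ x :: suf := by rw [hdic]; simp
    rw [PySem.List.enumerate_append, List.foldl_append,
      ih (x :: suf) hdic']
    have henum : PySem.List.enumerate [x] (0 + (pre.length : Int)) =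
        [((pre.length : Int), x)] := by
      rw [enum_cons]
      simp [PySem.List.enumerate_nil]
    rw [henum, List.foldl_cons, List.foldl_nil]
    -- branch facts
    by_cases hq : pvQual list_char x = true
    · have hok : pvOk list_char x = true := by
        have := hq; unfold pvQual at this; simp only [Bool.and_eq_true] at this; exact this.1
      have hany : ∃ c ∈ list_char, PySem.Str.isIn c x = true := by
        have := hq; unfold pvQual at this; simp only [Bool.and_eq_true, List.any_eq_true] at this
        exact this.2
      by_cases hxp : x ∈ pre
      · -- already seen: both sides unchanged
        have hxf : x ∈ pre.filter (pvQual list_char) := List.mem_filter.mpr ⟨hxp, hq⟩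
        rw [show pvF list_char
            (PySem.Set.ofList (pre.filter (pvQual list_char)),
             (PySem.Set.ofList (pre.filter (pvQual list_char))).map (pvTag list_char list_dic))
            ((pre.length : Int), x)
            = (PySem.Set.ofList (pre.filter (pvQual list_char)),
               (PySem.Set.ofList (pre.filter (pvQual list_char))).map (pvTag list_char list_dic))
          from by simp [pvF, hxp, hq]]
        rw [List.filter_append, List.filter_cons, if_pos hq, List.filter_nil]
        rw [PySem.Set.ofList_append_singleton,
          PySem.Set.add_of_mem ((PySem.Set.mem_ofList _ x).mpr hxf)]
      · -- new qualifying word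
        have hxf : x ∉ pre.filter (pvQual list_char) := fun hm => hxp (List.mem_filter.mp hm).1
        have hxs : x ∉ PySem.Set.ofList (pre.filter (pvQual list_char)) :=
          fun hm => hxf ((PySem.Set.mem_ofList _ x).mp hm)
        rcases Option.isSome_iff_exists.mp
            (enum_find_isSome (fun c => PySem.Str.isIn c x) list_char 0 hany)
          with ⟨found, hfound⟩
        have hfst : found.1 = pvK1 list_char x := by
          have := enum_find_fst (fun c => PySem.Str.isIn c x) list_char 0 found hfound
          unfold pvK1
          omega
        have hk2 : pvK2 list_dic x = (pre.length : Int) := by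
          unfold pvK2
          rw [hdic', List.idxOf_append, if_neg hxp, List.idxOf_cons_self]
          simp
        rw [show pvF list_char
            (PySem.Set.ofList (pre.filter (pvQual list_char)),
             (PySem.Set.ofList (pre.filter (pvQual list_char))).map (pvTag list_char list_dic))
            ((pre.length : Int), x)
            = ((PySem.Set.ofList (pre.filter (pvQual list_char))).add x,
               (PySem.Set.ofList (pre.filter (pvQual list_char))).map (pvTag list_char list_dic)
                 ++ [(found.1, (pre.length : Int), x)])
          from by
            have hokm : ∀ ch ∈ x.toList, String.ofList [ch] ∈ list_char := by
              have := hok; unfold pvOk at this; simpa using this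
            have hfound' : List.find? (fun p => PySem.Chars.isIn p.2.toList x.toList)
                (PySem.List.enumerate list_char) = some found := by
              simpa using hfound
            simp [pvF, hxp, hfound']
            exact hokm]
        rw [List.filter_append, List.filter_cons, if_pos hq, List.filter_nil,
          PySem.Set.ofList_append_singleton]
        rw [PySem.Set.add_of_not_mem hxs, List.map_append]
        congr 1
        simp [pvTag, hfst, hk2]
    · -- not qualifying: state unchanged, filter unchanged
      have hstep : pvF list_char
          (PySem.Set.ofList (pre.filter (pvQual list_char)),
           (PySem.Set.ofList (pre.filter (pvQual list_char))).map (pvTag list_char list_dic))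
          ((pre.length : Int), x)
          = (PySem.Set.ofList (pre.filter (pvQual list_char)),
             (PySem.Set.ofList (pre.filter (pvQual list_char))).map (pvTag list_char list_dic)) := by
        by_cases hok : pvOk list_char x = true
        · have hnoany : ∀ c ∈ list_char, PySem.Str.isIn c x = false := by
            intro c hc
            by_contra hcc
            apply hq
            unfold pvQual
            simp only [Bool.and_eq_true, List.any_eq_true]
            exact ⟨hok, c, hc, by revert hcc; cases PySem.Str.isIn c x <;> simp⟩
          have hq' : pvQual list_char x = false := Bool.eq_false_iff.mpr hq
          have hokm : ∀ ch ∈ x.toList, String.ofList [ch] ∈ list_char := by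
            have := hok; unfold pvOk at this; simpa using this
          have hnone' : List.find? (fun p => PySem.Chars.isIn p.2.toList x.toList)
              (PySem.List.enumerate list_char) = none := by
            simpa using enum_find_eq_none (fun c => PySem.Str.isIn c x) list_char 0 hnoany
          simp [pvF, hq', hnone']
        · have hok' : (x.toList.all fun c =>
              (PySem.Set.ofList list_char).contains (String.ofList [c])) = false := by
            rw [show (x.toList.all fun c =>
                (PySem.Set.ofList list_char).contains (String.ofList [c]))
                = x.toList.all fun c => list_char.contains (String.ofList [c]) from by
              simp only [contains_ofList]]
            exact Bool.eq_false_iff.mpr (fun h => hok h)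
          have hq' : pvQual list_char x = false := Bool.eq_false_iff.mpr hq
          have hnotall : ∃ ch ∈ x.toList, String.ofList [ch] ∉ list_char := by
            have := Bool.eq_false_iff.mpr hok
            unfold pvOk at this
            simpa using this
          simp [pvF, hq', hnotall]
      rw [hstep, List.filter_append, List.filter_cons, if_neg hq, List.filter_nil,
        List.append_nil]

-- ---- Step B1: B's fold builds tagged first occurrences of qualifying words
theorem stepB (list_char list_dic : List String) :
    search_vol_alt list_char list_dic =
      (PySem.List.sorted2
        ((PySem.List.dedup (list_dic.filter (pvQual list_char))).map (pvTag list_char list_dic))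
        (fun t => t.1) (fun t => t.2.1)).map (fun t => t.2.2) := by
  have h := stepB_inv list_char list_dic list_dic [] (by simp)
  show (PySem.List.sorted2
      ((PySem.List.enumerate list_dic).foldl (pvF list_char) (PySem.Set.empty, [])).2
      (fun t => t.1) (fun t => t.2.1)).map (fun t => t.2.2) = _
  rw [h, PySem.List.dedup_eq_ofList]

-- ---- sorted2 with two Int keys is sorted with the lexicographic key
theorem sorted2_eq_sorted_lex {α : Type} (xs : List α) (k1 k2 : α → Int) :
    PySem.List.sorted2 xs k1 k2 = PySem.List.sorted xs (fun x => toLex (k1 x, k2 x)) := by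
  have key : (fun a b => decide (k1 a < k1 b) || (!decide (k1 b < k1 a) && decide (k2 a < k2 b)))
      = fun a b => decide (toLex (k1 a, k2 a) < toLex (k1 b, k2 b)) := by
    funext a b
    by_cases h1 : k1 a < k1 b
    · simp [h1, Prod.Lex.toLex_lt_toLex]
    · by_cases h2 : k1 b < k1 a
      · simp [h1, h2, Prod.Lex.toLex_lt_toLex]
        omega
      · have he : k1 a = k1 b := by omega
        by_cases h3 : k2 a < k2 b <;> simp [h3, Prod.Lex.toLex_lt_toLex, he]
  show List.foldl (fun acc x => PySem.List.insertBy
      (fun a b => decide (k1 a < k1 b) || (!decide (k1 b < k1 a) && decide (k2 a < k2 b))) x acc) [] xs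
    = List.foldl (fun acc x => PySem.List.insertBy
      (fun a b => decide (toLex (k1 a, k2 a) < toLex (k1 b, k2 b))) x acc) [] xs
  rw [key]

-- ---- permutation: distinct members of pvL = distinct qualifying words
theorem perm_dedup (list_char list_dic : List String) :
    (PySem.List.dedup (pvL list_char list_dic)).Perm
      (PySem.List.dedup (list_dic.filter (pvQual list_char))) := by
  rw [PySem.List.dedup_eq_ofList, PySem.List.dedup_eq_ofList]
  apply (List.perm_ext_iff_of_nodup (PySem.Set.nodup_ofList _) (PySem.Set.nodup_ofList _)).mpr
  intro v
  simp only [PySem.Set.mem_ofList, pvL, pvQual, List.mem_flatMap, List.mem_filter,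
    Bool.and_eq_true, List.any_eq_true]
  tauto

-- ---- ordered dedup is pairwise along first-occurrence order
theorem pairwise_ofList {α : Type} [BEq α] [LawfulBEq α] (R : α → α → Prop) (xs : List α)
    (h : ∀ pre x suf, xs = pre ++ x :: suf → x ∉ pre → ∀ u ∈ pre, u ≠ x → R u x) :
    (PySem.Set.ofList xs).Pairwise R := by
  induction xs using List.reverseRecOn with
  | nil => simp [PySem.Set.ofList_nil]
  | append_singleton ys x ih =>
    rw [PySem.Set.ofList_append_singleton]
    have ih' := ih (fun pre x' suf hsplit hnp =>
      h pre x' (suf ++ [x]) (by rw [hsplit]; simp) hnp)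
    by_cases hx : x ∈ PySem.Set.ofList ys
    · rw [PySem.Set.add_of_mem hx]
      exact ih'
    · rw [PySem.Set.add_of_not_mem hx]
      refine List.pairwise_append.mpr ⟨ih', by simp, ?_⟩
      intro u hu b hb
      have hb' : b = x := by simpa using hb
      have hux : x ∉ ys := fun hmem => hx ((PySem.Set.mem_ofList ys x).mpr hmem)
      have huy : u ∈ ys := (PySem.Set.mem_ofList ys u).mp hu
      rw [hb']
      exact h ys x [] rfl hux u huy (fun he => hux (he ▸ huy))

-- ---- a split of a flatMap splits one of the pieces
theorem flatMap_split {α β : Type} (f : α → List β) (l : List α) (pre : List β) (x : β)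
    (suf : List β) (h : l.flatMap f = pre ++ x :: suf) :
    ∃ l1 a l2 bpre bsuf, l = l1 ++ a :: l2 ∧ f a = bpre ++ x :: bsuf ∧
      pre = l1.flatMap f ++ bpre := by
  induction l generalizing pre with
  | nil => simp at h
  | cons a l' ih =>
    rw [List.flatMap_cons] at h
    rcases List.append_eq_append_iff.mp h with ⟨as, h1, h2⟩ | ⟨bs, h1, h2⟩
    · rcases ih as h2 with ⟨l1', a', l2', bpre, bsuf, hl, hfa, hpre⟩
      exact ⟨a :: l1', a', l2', bpre, bsuf, by rw [hl]; simp, hfa,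
        by rw [h1, hpre, List.flatMap_cons, List.append_assoc]⟩
    · cases bs with
      | nil =>
        simp only [List.append_nil] at h1
        simp only [List.nil_append] at h2
        rcases ih [] (by simpa using h2.symm) with ⟨l1', a', l2', bpre, bsuf, hl, hfa, hpre⟩
        have hb1 : l1'.flatMap f = [] := (List.append_eq_nil_iff.mp hpre.symm).1
        have hb2 : bpre = [] := (List.append_eq_nil_iff.mp hpre.symm).2
        refine ⟨a :: l1', a', l2', [], bsuf, by rw [hl]; simp, by rw [hfa, hb2], ?_⟩
        rw [List.flatMap_cons, hb1, h1]
        simp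
      | cons b bs' =>
        have hx : x = b := by
          have := h2
          simp only [List.cons_append] at this
          exact (List.cons.injEq _ _ _ _).mp this |>.1
        refine ⟨[], a, l', pre, bs', rfl, ?_, by simp⟩
        rw [h1, hx]

-- ---- a filter split with the new element absent earlier orders first indices
theorem idxOf_lt_of_filter_split {α : Type} [BEq α] [LawfulBEq α] (q : α → Bool)
    (l : List α) (fpre : List α) (x : α) (fsuf : List α)
    (h : l.filter q = fpre ++ x :: fsuf) (hx : x ∉ fpre) (u : α) (hu : u ∈ fpre) :
    l.idxOf u < l.idxOf x := by
  have hqx : q x = true := by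
    have : x ∈ l.filter q := by rw [h]; simp
    exact (List.mem_filter.mp this).2
  have hqu : q u = true := by
    have : u ∈ l.filter q := by rw [h]; simp [hu]
    exact (List.mem_filter.mp this).2
  induction l generalizing fpre with
  | nil => simp at h
  | cons a t ih =>
    by_cases hq : q a = true
    · rw [List.filter_cons_of_pos hq] at h
      cases fpre with
      | nil => simp at hu
      | cons b fpre' =>
        have hab : a = b := by
          simpa using congrArg (fun l => l.head?) h
        have ht : t.filter q = fpre' ++ x :: fsuf := by
          simpa using congrArg (fun l => l.tail) h
        have hxa : x ≠ a := by
          intro he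
          exact hx (by rw [he, hab]; exact List.mem_cons_self)
        have hxidx : (a :: t).idxOf x = t.idxOf x + 1 := by
          simp [List.idxOf_cons, beq_eq_false_iff_ne.mpr (Ne.symm hxa)]
        by_cases hua : u = a
        · have : (a :: t).idxOf u = 0 := by simp [hua]
          omega
        · have huidx : (a :: t).idxOf u = t.idxOf u + 1 := by
            simp [List.idxOf_cons, beq_eq_false_iff_ne.mpr (Ne.symm hua)]
          have hu' : u ∈ fpre' := by
            rcases List.mem_cons.mp hu with he | h'
            · exact absurd (he.trans hab.symm) hua
            · exact h'
          have := ih fpre' ht (fun hm => hx (List.mem_cons_of_mem _ hm)) hu'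
          omega
    · rw [List.filter_cons_of_neg (by simpa using hq)] at h
      have hxa : x ≠ a := fun he => hq (he ▸ hqx)
      have hua : u ≠ a := fun he => hq (he ▸ hqu)
      have := ih fpre h hx hu
      simp [List.idxOf_cons, beq_eq_false_iff_ne.mpr (Ne.symm hxa),
        beq_eq_false_iff_ne.mpr (Ne.symm hua)]
      omega

-- ---- first occurrences in pvL are lexicographically ordered by (pvK1, pvK2)
theorem pairwise_key (list_char list_dic : List String) :
    (PySem.List.dedup (pvL list_char list_dic)).Pairwise
      (fun u v => pvKey (pvTag list_char list_dic u) < pvKey (pvTag list_char list_dic v)) := by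
  rw [PySem.List.dedup_eq_ofList]
  apply pairwise_ofList
  intro pre x suf hsplit hnp u hu hne
  rcases flatMap_split _ _ _ _ _ hsplit with ⟨cs1, c, cs2, bpre, bsuf, hchars, hfc, hpre⟩
  have hxfc : x ∈ list_dic.filter (fun v => PySem.Str.isIn c v && pvOk list_char v) := by
    rw [hfc]; simp
  have hxdic : x ∈ list_dic := (List.mem_filter.mp hxfc).1
  have hxc : PySem.Str.isIn c x = true := by
    have := (List.mem_filter.mp hxfc).2; simp only [Bool.and_eq_true] at this; exact this.1
  have hxok : pvOk list_char x = true := by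
    have := (List.mem_filter.mp hxfc).2; simp only [Bool.and_eq_true] at this; exact this.2
  have hnp1 : x ∉ cs1.flatMap
      (fun c => list_dic.filter (fun v => PySem.Str.isIn c v && pvOk list_char v)) := by
    intro hm; exact hnp (by rw [hpre]; exact List.mem_append_left _ hm)
  have hnp2 : x ∉ bpre := by
    intro hm; exact hnp (by rw [hpre]; exact List.mem_append_right _ hm)
  have hnotc1 : ∀ c' ∈ cs1, PySem.Str.isIn c' x = false := by
    intro c' hc'
    by_contra hcc
    refine hnp1 (List.mem_flatMap.mpr ⟨c', hc', List.mem_filter.mpr ⟨hxdic, ?_⟩⟩)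
    simp only [Bool.and_eq_true]
    exact ⟨by revert hcc; cases PySem.Str.isIn c' x <;> simp, hxok⟩
  have hK1x : pvK1 list_char x = (cs1.length : Int) := by
    unfold pvK1
    rw [hchars, List.findIdx_append]
    have h1 : List.findIdx (fun c => PySem.Str.isIn c x) cs1 = cs1.length :=
      List.findIdx_eq_length.mpr hnotc1
    rw [h1, if_neg (lt_irrefl _)]
    have hc0 : List.findIdx (fun c' => PySem.Str.isIn c' x) (c :: cs2) = 0 := by
      simp only [List.findIdx_cons, hxc, cond_true]
    rw [hc0]
    simp
  have hK1u_le : ∀ w, w ∈ bpre → pvK1 list_char w ≤ (cs1.length : Int) := by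
    intro w hw
    have hwc : PySem.Str.isIn c w = true := by
      have : w ∈ list_dic.filter (fun v => PySem.Str.isIn c v && pvOk list_char v) := by
        rw [hfc]; exact List.mem_append_left _ hw
      have := (List.mem_filter.mp this).2; simp only [Bool.and_eq_true] at this; exact this.1
    unfold pvK1
    rw [hchars, List.findIdx_append]
    by_cases hlt : List.findIdx (fun c => PySem.Str.isIn c w) cs1 < cs1.length
    · rw [if_pos hlt]; exact_mod_cast le_of_lt hlt
    · have hc0 : List.findIdx (fun c' => PySem.Str.isIn c' w) (c :: cs2) = 0 := by
        simp only [List.findIdx_cons, hwc, cond_true]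
      rw [if_neg hlt, hc0]
      simp
  -- now the two cases for u
  rw [hpre] at hu
  rcases List.mem_append.mp hu with hu1 | hu2
  · -- u comes from an earlier character block: pvK1 u < pvK1 x
    rcases List.mem_flatMap.mp hu1 with ⟨c', hc', huf⟩
    have huc : PySem.Str.isIn c' u = true := by
      have := (List.mem_filter.mp huf).2; simp only [Bool.and_eq_true] at this; exact this.1
    have hK1u : pvK1 list_char u < (cs1.length : Int) := by
      unfold pvK1
      rw [hchars, List.findIdx_append]
      have hlt : List.findIdx (fun c => PySem.Str.isIn c u) cs1 < cs1.length :=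
        List.findIdx_lt_length.mpr ⟨c', hc', huc⟩
      rw [if_pos hlt]
      exact_mod_cast hlt
    show pvKey _ < pvKey _
    unfold pvKey pvTag
    apply Prod.Lex.toLex_lt_toLex.mpr
    left
    simp only []
    omega
  · -- u is in the same block, earlier: pvK1 u ≤ pvK1 x, tie broken by pvK2
    have hle := hK1u_le u hu2
    show pvKey _ < pvKey _
    unfold pvKey pvTag
    apply Prod.Lex.toLex_lt_toLex.mpr
    rcases lt_or_eq_of_le hle with hlt | heq
    · left; simp only []; omega
    · right
      refine ⟨by simp only []; omega, ?_⟩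
      simp only [pvK2]
      have := idxOf_lt_of_filter_split _ list_dic bpre x bsuf hfc hnp2 u hu2
      exact_mod_cast this


-- ===== VERDICT (by name: the statement is the Claim_ definition above) =====
theorem search_vol_spec : Claim_equal_search_vol := by
  intro list_char list_dic _
  unfold Spec_search_vol
  rw [stepA, stepB, sorted2_eq_sorted_lex]
  have hperm :
      ((PySem.List.dedup (pvL list_char list_dic)).map (pvTag list_char list_dic)).Perm
        ((PySem.List.dedup (list_dic.filter (pvQual list_char))).map (pvTag list_char list_dic)) :=
    (perm_dedup list_char list_dic).map _
  have hpw :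
      ((PySem.List.dedup (pvL list_char list_dic)).map (pvTag list_char list_dic)).Pairwise
        (fun a b => pvKey a < pvKey b) :=
    List.pairwise_map.mpr (pairwise_key list_char list_dic)
  have hs := PySem.List.sorted_eq_of_perm_of_pairwise_lt
      ((PySem.List.dedup (list_dic.filter (pvQual list_char))).map (pvTag list_char list_dic))
      ((PySem.List.dedup (pvL list_char list_dic)).map (pvTag list_char list_dic))
      pvKey hperm hpw
  have hkey : (fun t : Int × Int × String => toLex (t.1, t.2.1)) = pvKey := by
    funext t; rfl
  rw [hkey, hs, List.map_map]
  have hid : ((fun t : Int × Int × String => t.2.2) ∘ pvTag list_char list_dic) = id := by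
    funext v; rfl
  rw [hid, List.map_id]
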